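-- pv_equiv track=rewrite | github.com/opencompl/lean-mlir | SSA/Projects/InstCombine/splitandprocess.py | getProofs
-- ===== SOURCE A (Python) =====
-- def getProofs(lines):
--     proofs = []
--
--     proof = []
--     for line in lines:
--         if line.startswith("-- Name"):
--             proofs.append(proof)
--             proof = []
--         proof.append(line)
--     proofs.append(proof)
--
--     return proofs[0], proofs[1:]
-- ===== SOURCE B (Python) =====
-- def getProofs(lines):
--     # back-to-front scan: a group is closed exactly when its marker line is seen
--     rest = []
--     cur = []
--     for line in reversed(lines):
--         cur.append(line)
--         if line.startswith("-- Name"):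
--             cur.reverse()
--             rest.append(cur)
--             cur = []
--     cur.reverse()
--     rest.reverse()
--     return cur, rest
-- ===== Notes on version B (the rewrite author's own statement) =====
-- stated objective: alternative
-- what changed: B scans the lines back-to-front, closing a group exactly when its '-- Name' marker line is reached, so the final flush and the proofs[0]/proofs[1:] indexing of A disappear; same O(n) cost.
import Mathlib
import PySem

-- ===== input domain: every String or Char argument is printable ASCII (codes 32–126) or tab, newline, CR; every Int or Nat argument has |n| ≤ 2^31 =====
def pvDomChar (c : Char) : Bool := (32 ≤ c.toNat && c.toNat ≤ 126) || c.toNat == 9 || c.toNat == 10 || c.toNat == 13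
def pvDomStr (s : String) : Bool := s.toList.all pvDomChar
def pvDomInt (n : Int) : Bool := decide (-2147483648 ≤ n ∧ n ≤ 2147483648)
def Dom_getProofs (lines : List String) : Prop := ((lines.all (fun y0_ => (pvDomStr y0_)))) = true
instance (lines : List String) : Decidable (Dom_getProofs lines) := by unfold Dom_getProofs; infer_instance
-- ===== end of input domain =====

-- B is an alternative decomposition: a single back-to-front scan that closes a group when its
-- marker line is reached, instead of A's forward scan with a final flush and proofs[0]/proofs[1:].

-- ===== PORT A =====
-- loop body of A: flush `proof` into `proofs` on a marker line, then append the line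
def stepA (s : List (List String) × List String) (line : String) :
    List (List String) × List String :=
  if PySem.Str.startswith line "-- Name" then (s.1 ++ [s.2], [] ++ [line])
  else (s.1, s.2 ++ [line])

def getProofs (lines : List String) : List String × List (List String) :=
  let st := lines.foldl stepA ([], [])
  let proofs := st.1 ++ [st.2]
  -- proofs[0] and proofs[1:]: `proofs` ends with `++ [st.2]`, hence is nonempty, so
  -- pyGet? … 0 is exactly proofs[0] (never an IndexError) and slice 1 none is proofs[1:]
  ((PySem.List.pyGet? proofs 0).getD [], PySem.List.slice proofs (some 1) none)

-- ===== PORT B =====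
-- loop body of B; `cur` and `rest` are built by appending and reversed, as in Source B
def stepB (s : List String × List (List String)) (line : String) :
    List String × List (List String) :=
  let cur := s.1 ++ [line]
  if PySem.Str.startswith line "-- Name" then ([], s.2 ++ [cur.reverse]) else (cur, s.2)

def getProofs_alt (lines : List String) : List String × List (List String) :=
  -- `for line in reversed(lines)` = foldl over lines.reverse
  let st := lines.reverse.foldl stepB ([], [])
  (st.1.reverse, st.2.reverse)

-- ===== PRECONDITION & SPEC =====
def Spec_getProofs (lines : List String) (out : List String × List (List String)) : Prop := out = getProofs_alt lines
instance (lines : List String) (out : List String × List (List String)) : Decidable (Spec_getProofs lines out) := by unfold Spec_getProofs; infer_instance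

-- ===== CLAIM (what is proved, stated in full; the proofs are below) =====
def Claim_equal_getProofs : Prop := ∀ (lines : List String), Dom_getProofs lines → Spec_getProofs lines (getProofs lines)

-- ===== LEMMAS AND PROOFS =====

/-- Proof-side reformulation of B's reverse scan as a structural foldr with
head-prepending (no reversals in the state). -/
def stepR (line : String) (s : List String × List (List String)) :
    List String × List (List String) :=
  let cur := line :: s.1
  if PySem.Str.startswith line "-- Name" then ([], cur :: s.2) else (cur, s.2)

/-- B's foldl over the reversed lines carries exactly the component-wise reversal of
the foldr scan's state. -/
theorem foldB_eq (lines : List String) :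
    lines.reverse.foldl stepB ([], [])
      = ((lines.foldr stepR ([], [])).1.reverse, (lines.foldr stepR ([], [])).2.reverse) := by
  rw [List.foldl_reverse]
  induction lines with
  | nil => simp
  | cons l ls ih =>
    simp only [List.foldr_cons]
    rw [ih]
    simp only [stepB, stepR]
    split_ifs with h <;> simp

/-- Invariant of A's forward fold: its flushed groups plus the pending group equal the
already-flushed prefix `ps` followed by `p` glued onto the reverse scan's result. -/
theorem foldA_eq (lines : List String) : ∀ (ps : List (List String)) (p : List String),
    (lines.foldl stepA (ps, p)).1 ++ [(lines.foldl stepA (ps, p)).2]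
      = ps ++ (p ++ (lines.foldr stepR ([], [])).1) :: (lines.foldr stepR ([], [])).2 := by
  induction lines with
  | nil => intro ps p; simp
  | cons l ls ih =>
    intro ps p
    simp only [List.foldl_cons, List.foldr_cons, stepA, stepR]
    split_ifs with h <;> simp [ih]

theorem getProofs_spec : Claim_equal_getProofs := by
  intro lines _
  show getProofs lines = getProofs_alt lines
  unfold getProofs getProofs_alt
  have hA := foldA_eq lines [] []
  simp only [List.nil_append] at hA
  rw [foldB_eq]
  simp [hA, PySem.List.slice_from_one]
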